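-- pv_equiv track=rewrite | github.com/typerefinery-ai/brett_blocks | Block_Families/OS_Triage/Mouse/get_connection_types.py | clean_string_convert_to_list
-- ===== SOURCE A (Python) =====
-- def clean_string_convert_to_list(string):
-- 	"""Convert a string to a list of strings."""
-- 	result_list = []
-- 	if isinstance(string, str):
-- 		# Check if a comma exists and split
-- 		if ',' in string:
-- 			result_list = string.split(',')
-- 		else:
-- 			result_list = [string]  # Keep the string as is if no comma
-- 		# strip out any space in the strings in the list
-- 		result_list = [item.strip() for item in result_list]
-- 		return result_list
-- 	elif isinstance(string, list):
-- 		# For each item in the list, split on any commas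
-- 		for item in string:
-- 			if isinstance(item, str):
-- 				if ',' in item:
-- 					result_list += item.split(',')
-- 				else:
-- 					result_list.append(item)
-- 		# strip out any space in the strings in the list
-- 		result_list = [item.strip() for item in result_list]
-- 		return result_list
-- 	else:
-- 		return result_list
-- ===== SOURCE B (Python) =====
-- def clean_string_convert_to_list(string):
--     """Convert a string to a list of strings."""
--     # Single character-level scan: tokens are accumulated char by char and
--     # emitted (stripped) at each ',' and at the end -- no split(), no
--     # comma-membership check, no per-branch handling.
--     if isinstance(string, str):
--         items = [string]
--     elif isinstance(string, list):
--         items = [x for x in string if isinstance(x, str)]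
--     else:
--         return []
--     result = []
--     for item in items:
--         cur = []
--         for ch in item:
--             if ch == ',':
--                 result.append(''.join(cur).strip())
--                 cur = []
--             else:
--                 cur.append(ch)
--         result.append(''.join(cur).strip())
--     return result
-- ===== Notes on version B (the rewrite author's own statement) =====
-- stated objective: alternative
-- what changed: Replaces the type-branched split()/comma-check logic with a single character-level scan that accumulates each token char by char and emits it stripped at every comma and at the end of each item.
import Mathlib
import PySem

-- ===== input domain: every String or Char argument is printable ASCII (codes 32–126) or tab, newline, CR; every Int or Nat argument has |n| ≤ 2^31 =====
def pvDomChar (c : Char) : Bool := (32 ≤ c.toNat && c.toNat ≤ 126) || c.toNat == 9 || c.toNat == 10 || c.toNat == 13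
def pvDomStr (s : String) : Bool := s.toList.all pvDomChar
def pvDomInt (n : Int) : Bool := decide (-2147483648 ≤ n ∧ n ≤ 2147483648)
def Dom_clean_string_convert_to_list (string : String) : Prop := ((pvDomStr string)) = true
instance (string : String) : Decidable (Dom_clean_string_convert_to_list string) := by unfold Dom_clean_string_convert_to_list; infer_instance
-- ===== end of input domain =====

-- B replaces A's comma-check/split with a single character-level scan that builds each
-- token char by char and emits it stripped at every ',' and at the end; objective: alternative.


-- ===== PORT A =====
-- The argument is a String, so only A's str branch is reachable.
-- s.split(',') with a nonempty separator is exactly Chars.splitOn on code points.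
def clean_string_convert_to_list (string : String) : List String :=
  let result_list : List String :=
    if PySem.Str.isIn "," string then
      (PySem.Chars.splitOn string.toList [',']).map String.ofList
    else
      [string]
  result_list.map PySem.Str.strip

-- ===== PORT B =====
-- B's inner character loop: `cur` is the current token (reversed accumulator),
-- `acc` the emitted result list; a token is emitted stripped at ',' and at the end.
def pvScan : List Char → List Char → List String → List String
  | [], cur, acc => acc ++ [PySem.Str.strip (String.ofList cur.reverse)]
  | c :: rest, cur, acc =>
    if c = ',' then pvScan rest [] (acc ++ [PySem.Str.strip (String.ofList cur.reverse)])
    else pvScan rest (c :: cur) acc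

def clean_string_convert_to_list_alt (string : String) : List String :=
  pvScan string.toList [] []

-- ===== PRECONDITION & SPEC =====
def Spec_clean_string_convert_to_list (string : String) (out : List String) : Prop := out = clean_string_convert_to_list_alt string
instance (string : String) (out : List String) : Decidable (Spec_clean_string_convert_to_list string out) := by unfold Spec_clean_string_convert_to_list; infer_instance

-- ===== CLAIM (what is proved, stated in full; the proofs are below) =====
def Claim_equal_clean_string_convert_to_list : Prop := ∀ (string : String), Dom_clean_string_convert_to_list string → Spec_clean_string_convert_to_list string (clean_string_convert_to_list string)

-- ===== LEMMAS AND PROOFS =====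

-- the character scan computes splitOn-and-strip, in lockstep with splitOn.go
theorem pvScan_go : ∀ (l : List Char) (fuel : Nat) (cur : List Char) (accS : List (List Char)),
    l.length < fuel →
    pvScan l cur (accS.reverse.map (fun t => PySem.Str.strip (String.ofList t)))
      = (PySem.Chars.splitOn.go [','] fuel l cur accS).map (fun t => PySem.Str.strip (String.ofList t)) := by
  intro l
  induction l with
  | nil =>
    intro fuel cur accS h
    cases fuel with
    | zero => omega
    | succ n => simp [pvScan, PySem.Chars.splitOn.go]
  | cons c rest ih =>
    intro fuel cur accS h
    cases fuel with
    | zero => omega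
    | succ n =>
      by_cases hc : c = ','
      · subst hc
        rw [pvScan, if_pos rfl, PySem.Chars.splitOn.go]
        have hpre : List.isPrefixOf [','] (',' :: rest) = true := by simp [List.isPrefixOf]
        rw [hpre]
        simp only [if_true, List.length_cons, List.drop_succ_cons]
        have := ih n [] (cur.reverse :: accS) (by simp at h; omega)
        simpa using this
      · rw [pvScan, if_neg hc, PySem.Chars.splitOn.go]
        have hpre : List.isPrefixOf [','] (c :: rest) = false := by
          simp [List.isPrefixOf]
          exact fun hcx => absurd hcx.symm hc
        rw [hpre]
        simp only [Bool.false_eq_true, if_false]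
        exact ih n (c :: cur) accS (by simp at h ⊢; omega)

-- B equals splitOn followed by strip
theorem alt_eq_splitOn (s : String) :
    clean_string_convert_to_list_alt s
      = (PySem.Chars.splitOn s.toList [',']).map (fun t => PySem.Str.strip (String.ofList t)) := by
  unfold clean_string_convert_to_list_alt PySem.Chars.splitOn
  have := pvScan_go s.toList (s.toList.length + 1) [] [] (by omega)
  simpa using this

-- splitOn.go never splits when the (single-char) separator does not occur in the remainder
theorem splitOn_go_no_sep (c : Char) : ∀ (fuel : Nat) (l cur : List Char) (acc : List (List Char)),
    c ∉ l → PySem.Chars.splitOn.go [c] fuel l cur acc = ((cur.reverse ++ l) :: acc).reverse := by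
  intro fuel
  induction fuel with
  | zero => intro l cur acc _; rfl
  | succ n ih =>
    intro l cur acc h
    cases l with
    | nil => simp [PySem.Chars.splitOn.go]
    | cons x rest =>
      have hx : x ≠ c := fun hxc => h (hxc ▸ List.mem_cons_self)
      have hpre : List.isPrefixOf [c] (x :: rest) = false := by
        simp [List.isPrefixOf]
        exact fun hcx => absurd hcx.symm hx
      rw [PySem.Chars.splitOn.go, hpre]
      simp only [Bool.false_eq_true, if_false]
      rw [ih rest (x :: cur) acc (fun hm => h (List.mem_cons_of_mem _ hm))]
      simp

-- if the separator char does not occur, splitOn returns the whole list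
theorem splitOn_no_sep (c : Char) (s : List Char) (h : c ∉ s) :
    PySem.Chars.splitOn s [c] = [s] := by
  unfold PySem.Chars.splitOn
  rw [splitOn_go_no_sep c _ s [] [] h]
  simp

-- ===== VERDICT (by name: the statement is the Claim_ definition above) =====
theorem clean_string_convert_to_list_spec : Claim_equal_clean_string_convert_to_list := by
  intro s _
  unfold Spec_clean_string_convert_to_list clean_string_convert_to_list
  rw [alt_eq_splitOn]
  have hl : (",".toList) = [','] := rfl
  rw [show PySem.Str.isIn "," s = PySem.Chars.isIn [','] s.toList from by rw [PySem.Str.isIn_eq, hl]]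
  by_cases h : PySem.Chars.isIn [','] s.toList = true
  · rw [if_pos h]
    simp
  · have hni : ¬ ([','] <:+: s.toList) := fun hinf =>
      h ((PySem.Chars.isIn_iff_infix _ _).mpr hinf)
    have hmem : ',' ∉ s.toList := fun hm => by
      obtain ⟨pre, suf, hps⟩ := List.append_of_mem hm
      exact hni ⟨pre, suf, by simp [hps]⟩
    rw [if_neg h, splitOn_no_sep ',' s.toList hmem]
    simp
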